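-- pv_equiv track=rewrite | github.com/Joshua992700/repo-summarizer | python-backend/utils.py | sort_files_by_priority
-- ===== SOURCE A (Python) =====
-- from typing import Dict, List, Optional, Tuple
--
-- PRIORITY_FILES = [
--     "README.md",
--     "readme.md",
--     "README.rst",
--     "README",
--     "package.json",
--     "requirements.txt",
--     "pyproject.toml",
--     "setup.py",
--     "Cargo.toml",
--     "go.mod",
--     "pom.xml",
--     "build.gradle",
--     "Gemfile",
--     "composer.json",
--     "Dockerfile",
--     "docker-compose.yml",
--     "docker-compose.yaml",
--     ".env.example",
--     "Makefile",
--     "main.py",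
--     "main.go",
--     "main.rs",
--     "index.js",
--     "index.ts",
--     "app.py",
--     "server.py",
--     "app.js",
--     "server.js",
-- ]
--
-- def is_priority_file(path: str) -> bool:
--     """Check if a file should be prioritized in summarization."""
--     filename = path.split("/")[-1]
--     return filename in PRIORITY_FILES or path in PRIORITY_FILES
--
-- def sort_files_by_priority(files: List[Dict]) -> List[Dict]:
--     """Sort files with priority files first."""
--     priority = []
--     regular = []
--
--     for file in files:
--         if is_priority_file(file.get("path", "")):
--             priority.append(file)
--         else:
--             regular.append(file)
--
--     return priority + regular
-- ===== SOURCE B (Python) =====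
-- from typing import Dict, List
--
-- PRIORITY_FILES = [
--     "README.md",
--     "readme.md",
--     "README.rst",
--     "README",
--     "package.json",
--     "requirements.txt",
--     "pyproject.toml",
--     "setup.py",
--     "Cargo.toml",
--     "go.mod",
--     "pom.xml",
--     "build.gradle",
--     "Gemfile",
--     "composer.json",
--     "Dockerfile",
--     "docker-compose.yml",
--     "docker-compose.yaml",
--     ".env.example",
--     "Makefile",
--     "main.py",
--     "main.go",
--     "main.rs",
--     "index.js",
--     "index.ts",
--     "app.py",
--     "server.py",
--     "app.js",
--     "server.js",
-- ]
--
-- def is_priority_file(path: str) -> bool: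
--     filename = path.split("/")[-1]
--     return filename in PRIORITY_FILES or path in PRIORITY_FILES
--
-- def sort_files_by_priority(files: List[Dict]) -> List[Dict]:
--     """Sort files with priority files first (stable sort on a 0/1 key)."""
--     return sorted(files, key=lambda f: 0 if is_priority_file(f.get("path", "")) else 1)
-- ===== Notes on version B (the rewrite author's own statement) =====
-- stated objective: idiomatic
-- what changed: Replaces the explicit two-accumulator partition loop with a single stable sort on a 0/1 priority key; stability keeps each group's original relative order, reproducing priority + regular.
import Mathlib
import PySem

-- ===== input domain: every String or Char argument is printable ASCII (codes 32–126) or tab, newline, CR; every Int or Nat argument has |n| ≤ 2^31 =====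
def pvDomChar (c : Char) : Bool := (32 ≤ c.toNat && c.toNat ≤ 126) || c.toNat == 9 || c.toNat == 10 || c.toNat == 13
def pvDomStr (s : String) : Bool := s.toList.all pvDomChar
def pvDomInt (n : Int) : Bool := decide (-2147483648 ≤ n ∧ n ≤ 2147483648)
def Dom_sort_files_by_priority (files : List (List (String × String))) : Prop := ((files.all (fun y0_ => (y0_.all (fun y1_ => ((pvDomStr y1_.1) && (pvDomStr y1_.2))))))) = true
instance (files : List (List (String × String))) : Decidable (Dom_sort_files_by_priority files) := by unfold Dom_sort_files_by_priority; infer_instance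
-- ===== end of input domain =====

-- B replaces A's two-accumulator partition loop with one stable sort on a 0/1 priority
-- key (idiomatic); equivalence is about the return value (neither version mutates input).

-- ===== PORT A =====
def pvPRIORITY_FILES : List String :=
  ["README.md", "readme.md", "README.rst", "README", "package.json", "requirements.txt",
   "pyproject.toml", "setup.py", "Cargo.toml", "go.mod", "pom.xml", "build.gradle",
   "Gemfile", "composer.json", "Dockerfile", "docker-compose.yml", "docker-compose.yaml",
   ".env.example", "Makefile", "main.py", "main.go", "main.rs", "index.js", "index.ts",
   "app.py", "server.py", "app.js", "server.js"]

-- path.split("/")[-1]: the separator is nonempty (split? = some) and Python's split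
-- always yields a nonempty list, so both '.getD' defaults are unreachable — exact.
def is_priority_file (path : String) : Bool :=
  let filename := PySem.List.pyGetD ((PySem.Str.split? path "/").getD []) (-1) ""
  pvPRIORITY_FILES.contains filename || pvPRIORITY_FILES.contains path

-- the loop: two accumulators, append to one of them, then priority ++ regular
def sort_files_by_priority (files : List (List (String × String))) : List (List (String × String)) :=
  let pr := files.foldl
    (fun (acc : List (List (String × String)) × List (List (String × String))) file =>
      if is_priority_file (PySem.Dict.getD (PySem.Dict.mk file) "path" "") then
        (acc.1 ++ [file], acc.2)
      else
        (acc.1, acc.2 ++ [file]))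
    ([], [])
  pr.1 ++ pr.2

-- ===== PORT B =====
-- sorted(files, key=lambda f: 0 if is_priority_file(f.get("path", "")) else 1)
def sort_files_by_priority_alt (files : List (List (String × String))) : List (List (String × String)) :=
  PySem.List.sorted files
    (fun f => if is_priority_file (PySem.Dict.getD (PySem.Dict.mk f) "path" "") then (0 : Int) else 1)
    false

-- ===== PRECONDITION & SPEC =====
def Spec_sort_files_by_priority (files : List (List (String × String))) (out : List (List (String × String))) : Prop := out = sort_files_by_priority_alt files
instance (files : List (List (String × String))) (out : List (List (String × String))) : Decidable (Spec_sort_files_by_priority files out) := by unfold Spec_sort_files_by_priority; infer_instance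

-- ===== CLAIM (what is proved, stated in full; the proofs are below) =====
def Claim_equal_sort_files_by_priority : Prop := ∀ (files : List (List (String × String))), Dom_sort_files_by_priority files → Spec_sort_files_by_priority files (sort_files_by_priority files)

-- ===== LEMMAS AND PROOFS =====

-- the 0/1 key and the priority predicate, abbreviated for the proofs
def pvPrio (f : List (String × String)) : Bool :=
  is_priority_file (PySem.Dict.getD (PySem.Dict.mk f) "path" "")

def pvKey (f : List (String × String)) : Int := if pvPrio f then 0 else 1

def pvBefore (a b : List (String × String)) : Bool := decide (pvKey a < pvKey b)

theorem pvBefore_false_of_prio_right (a b : List (String × String)) (h : pvPrio b = true) :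
    pvBefore a b = false := by
  simp [pvBefore, pvKey, h]; split <;> omega

theorem pvBefore_false_of_not_prio_left (a b : List (String × String)) (h : pvPrio a = false) :
    pvBefore a b = false := by
  simp [pvBefore, pvKey, h]; split <;> omega

theorem pvBefore_true (a b : List (String × String)) (ha : pvPrio a = true)
    (hb : pvPrio b = false) : pvBefore a b = true := by
  simp [pvBefore, pvKey, ha, hb]

theorem insertBy_skip {α : Type} (b : α → α → Bool) (x : α) (P R : List α)
    (hP : ∀ y ∈ P, b x y = false) :
    PySem.List.insertBy b x (P ++ R) = P ++ PySem.List.insertBy b x R := by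
  induction P with
  | nil => simp
  | cons y P ih =>
    have hy : b x y = false := hP y (by simp)
    simp [PySem.List.insertBy, hy]
    exact ih (fun z hz => hP z (by simp [hz]))

theorem insertBy_all_false {α : Type} (b : α → α → Bool) (x : α) (R : List α)
    (hR : ∀ y ∈ R, b x y = false) :
    PySem.List.insertBy b x R = R ++ [x] :=
  PySem.List.insertBy_of_forall_not_before b x R hR

theorem insertBy_head_true {α : Type} (b : α → α → Bool) (x : α) (R : List α)
    (hR : ∀ y ∈ R, b x y = true) :
    PySem.List.insertBy b x R = x :: R := by
  cases R with
  | nil => simp [PySem.List.insertBy]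
  | cons y R => simp [PySem.List.insertBy, hR y (by simp)]

-- A's loop from an arbitrary accumulator pair is the filter-based partition
theorem loopA_eq (xs : List (List (String × String)))
    (P R : List (List (String × String))) :
    xs.foldl
      (fun (acc : List (List (String × String)) × List (List (String × String))) file =>
        if pvPrio file then (acc.1 ++ [file], acc.2) else (acc.1, acc.2 ++ [file]))
      (P, R)
    = (P ++ xs.filter pvPrio, R ++ xs.filter (fun f => ! pvPrio f)) := by
  induction xs generalizing P R with
  | nil => simp
  | cons x xs ih =>
    by_cases h : pvPrio x = true
    · simp [h, ih]
    · simp at h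
      simp [h, ih]

-- B's insertion sort from a well-formed accumulator keeps priorities in front
theorem loopB_eq (xs : List (List (String × String)))
    (P R : List (List (String × String)))
    (hP : ∀ y ∈ P, pvPrio y = true) (hR : ∀ y ∈ R, pvPrio y = false) :
    xs.foldl (fun acc x => PySem.List.insertBy pvBefore x acc) (P ++ R)
    = (P ++ xs.filter pvPrio) ++ (R ++ xs.filter (fun f => ! pvPrio f)) := by
  induction xs generalizing P R with
  | nil => simp
  | cons x xs ih =>
    by_cases h : pvPrio x = true
    · have hins : PySem.List.insertBy pvBefore x (P ++ R) = (P ++ [x]) ++ R := by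
        rw [insertBy_skip pvBefore x P R
          (fun y hy => pvBefore_false_of_prio_right x y (hP y hy))]
        rw [insertBy_head_true pvBefore x R
          (fun y hy => pvBefore_true x y h (hR y hy))]
        simp
      have := ih (P ++ [x]) R
        (by intro y hy; rcases List.mem_append.1 hy with hy | hy
            · exact hP y hy
            · simp at hy; subst hy; exact h) hR
      simp only [List.foldl_cons, hins, this]
      simp [h]
    · simp at h
      have hins : PySem.List.insertBy pvBefore x (P ++ R) = P ++ (R ++ [x]) := by
        rw [insertBy_all_false pvBefore x (P ++ R)
          (fun y _ => pvBefore_false_of_not_prio_left x y h)]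
        simp
      have := ih P (R ++ [x]) hP
        (by intro y hy; rcases List.mem_append.1 hy with hy | hy
            · exact hR y hy
            · simp at hy; subst hy; exact h)
      simp only [List.foldl_cons, hins, this]
      simp [h]

theorem portA_eq_partition (files : List (List (String × String))) :
    sort_files_by_priority files
    = files.filter pvPrio ++ files.filter (fun f => ! pvPrio f) := by
  show (files.foldl
      (fun (acc : List (List (String × String)) × List (List (String × String))) file =>
        if pvPrio file then (acc.1 ++ [file], acc.2) else (acc.1, acc.2 ++ [file]))
      ([], [])).1
    ++ (files.foldl
      (fun (acc : List (List (String × String)) × List (List (String × String))) file =>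
        if pvPrio file then (acc.1 ++ [file], acc.2) else (acc.1, acc.2 ++ [file]))
      ([], [])).2
    = files.filter pvPrio ++ files.filter (fun f => ! pvPrio f)
  rw [loopA_eq]; simp

theorem portB_eq_partition (files : List (List (String × String))) :
    sort_files_by_priority_alt files
    = files.filter pvPrio ++ files.filter (fun f => ! pvPrio f) := by
  show PySem.List.sorted files pvKey false
    = files.filter pvPrio ++ files.filter (fun f => ! pvPrio f)
  rw [PySem.List.sorted_eq_foldl_insertBy]
  show files.foldl (fun acc x => PySem.List.insertBy pvBefore x acc) []
    = files.filter pvPrio ++ files.filter (fun f => ! pvPrio f)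
  have := loopB_eq files [] [] (by simp) (by simp)
  simpa using this

-- ===== VERDICT (by name: the statement is the Claim_ definition above) =====
theorem sort_files_by_priority_spec : Claim_equal_sort_files_by_priority := by
  intro files _
  unfold Spec_sort_files_by_priority
  rw [portA_eq_partition, portB_eq_partition]
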